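-- pv_equiv track=rewrite | github.com/greenblat/vlsistuff | verpy/pybin3/synthesis0.py | int2bus
-- ===== SOURCE A (Python) =====
-- def int2bus(Wid,Int):
--     res = []
--     for ii in range(Wid):
--         if (Int>>ii) & 1:
--             res.append('vcc')
--         else:
--             res.append('gnd')
--     res.reverse()
--     return ['bus']+res
-- ===== SOURCE B (Python) =====
-- def int2bus(Wid, Int):
--     if Wid <= 0:
--         return ['bus']
--     masked = Int & ((1 << Wid) - 1)
--     bits = bin(masked)[2:].zfill(Wid)
--     return ['bus'] + ['vcc' if c == '1' else 'gnd' for c in bits]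
-- ===== Notes on version B (the rewrite author's own statement) =====
-- stated objective: idiomatic
-- what changed: Replaces the per-bit shift/test loop plus list reverse with a single masked int-to-binary-string conversion (bin + zfill) mapped MSB-first by a comprehension.
import Mathlib
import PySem

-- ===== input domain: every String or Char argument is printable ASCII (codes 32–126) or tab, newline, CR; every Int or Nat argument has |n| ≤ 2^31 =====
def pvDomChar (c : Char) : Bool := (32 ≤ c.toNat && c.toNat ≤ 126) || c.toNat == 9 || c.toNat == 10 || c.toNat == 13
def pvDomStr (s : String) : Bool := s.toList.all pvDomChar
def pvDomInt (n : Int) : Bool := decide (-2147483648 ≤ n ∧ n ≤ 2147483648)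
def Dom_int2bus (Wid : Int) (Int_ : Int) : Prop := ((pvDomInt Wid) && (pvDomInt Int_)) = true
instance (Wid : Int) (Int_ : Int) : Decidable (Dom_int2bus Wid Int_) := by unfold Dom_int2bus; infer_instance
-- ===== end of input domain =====

-- B converts the masked integer to a binary string (bin + zfill) and maps it MSB-first,
-- instead of A's per-bit shift/test loop followed by a reverse; same values on every input.

-- ===== PORT A =====
-- ii drawn from range(0, Wid) is always ≥ 0, so 'ii.toNat' is the exact shift amount Python uses
def int2bus (Wid : Int) (Int_ : Int) : List String :=
  let res := (PySem.List.pyRange 0 Wid 1).foldl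
    (fun res ii => res ++ [if PySem.Int.band (HShiftRight.hShiftRight (β := Nat) Int_ ii.toNat) 1 ≠ 0 then "vcc" else "gnd"]) []
  ["bus"] ++ res.reverse

-- ===== PORT B =====
-- binCore m = bin(m)[2:] for m > 0 (MSB-first binary digits, no leading zeros); exact for positive ints
def binCore : Nat → List Char
  | 0 => []
  | m+1 => binCore ((m+1)/2) ++ [if (m+1) % 2 = 1 then '1' else '0']
decreasing_by exact Nat.div_lt_self (Nat.succ_pos m) (by omega)

-- pyBin m = bin(m)[2:] for m ≥ 0 (bin(0)[2:] = "0")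
def pyBin (m : Nat) : List Char := if m = 0 then ['0'] else binCore m

-- masked = Int & ((1 << Wid) - 1) is ≥ 0 (Wid > 0 here), so '.toNat' is exact;
-- bin(masked)[2:] has ≤ Wid chars, so zfill(Wid) = prepend (Wid - len) zeros, exactly the replicate
def int2bus_alt (Wid : Int) (Int_ : Int) : List String :=
  if Wid ≤ 0 then ["bus"]
  else
    let masked := (PySem.Int.band Int_ ((1 <<< Wid.toNat) - 1)).toNat
    let bits := List.replicate (Wid.toNat - (pyBin masked).length) '0' ++ pyBin masked
    ["bus"] ++ bits.map (fun c => if c = '1' then "vcc" else "gnd")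

-- ===== PRECONDITION & SPEC =====
def Spec_int2bus (Wid : Int) (Int_ : Int) (out : List String) : Prop := out = int2bus_alt Wid Int_
instance (Wid : Int) (Int_ : Int) (out : List String) : Decidable (Spec_int2bus Wid Int_ out) := by unfold Spec_int2bus; infer_instance

-- ===== CLAIM (what is proved, stated in full; the proofs are below) =====
def Claim_equal_int2bus : Prop := ∀ (Wid : Int) (Int_ : Int), Dom_int2bus Wid Int_ → Spec_int2bus Wid Int_ (int2bus Wid Int_)

-- ===== LEMMAS AND PROOFS =====

-- the Wid-bit little-endian-built, MSB-first list of binary digit chars of m (reference form)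
def bitsChars : Nat → Nat → List Char
  | 0, _ => []
  | n+1, m => bitsChars n (m/2) ++ [if m % 2 = 1 then '1' else '0']

def chr2sig (c : Char) : String := if c = '1' then "vcc" else "gnd"

theorem binCore_zero : binCore 0 = [] := by rw [binCore]

theorem binCore_succ (m : Nat) :
    binCore (m+1) = binCore ((m+1)/2) ++ [if (m+1) % 2 = 1 then '1' else '0'] := by rw [binCore]

theorem binCore_one : binCore 1 = ['1'] := by
  rw [show (1:Nat) = 0 + 1 from rfl, binCore_succ 0]
  norm_num [binCore_zero]

theorem len_bitsChars (n : Nat) : ∀ m, (bitsChars n m).length = n := by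
  induction n with
  | zero => intro m; rfl
  | succ n ih => intro m; simp [bitsChars, ih]

theorem bitsChars_zero_cons (n : Nat) : ∀ m, m < 2^n → bitsChars (n+1) m = '0' :: bitsChars n m := by
  induction n with
  | zero => intro m hm; interval_cases m; rfl
  | succ n ih =>
    intro m hm
    have h2 : m / 2 < 2^n := by
      have : (2:Nat)^(n+1) = 2^n * 2 := pow_succ 2 n
      omega
    show bitsChars (n+1) (m/2) ++ _ = '0' :: (bitsChars n (m/2) ++ _)
    rw [ih (m/2) h2]; rfl

theorem binCore_eq (n : Nat) : ∀ m, 2^n ≤ m → m < 2^(n+1) →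
    binCore m = bitsChars (n+1) m ∧ (binCore m).length = n+1 := by
  induction n with
  | zero =>
    intro m h1 h2
    interval_cases m
    refine ⟨?_, ?_⟩ <;> rw [binCore_one] <;> rfl
  | succ n ih =>
    intro m h1 h2
    have hpow : (2:Nat)^(n+1) = 2^n * 2 := pow_succ 2 n
    have hpow2 : (2:Nat)^(n+2) = 2^(n+1) * 2 := pow_succ 2 (n+1)
    have hm1 : 1 ≤ m := by have := Nat.one_le_two_pow (n := n+1); omega
    obtain ⟨k, rfl⟩ : ∃ k, m = k + 1 := ⟨m - 1, by omega⟩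
    have hd1 : 2^n ≤ (k+1)/2 := by omega
    have hd2 : (k+1)/2 < 2^(n+1) := by omega
    obtain ⟨ihe, ihl⟩ := ih ((k+1)/2) hd1 hd2
    rw [binCore_succ k]
    constructor
    · show binCore ((k+1)/2) ++ _ = bitsChars (n+1) ((k+1)/2) ++ _
      rw [ihe]
    · simp [ihl]

theorem pyBin_pad (n : Nat) : ∀ m, m < 2^n → 1 ≤ n →
    List.replicate (n - (pyBin m).length) '0' ++ pyBin m = bitsChars n m := by
  induction n with
  | zero => intro m _ h; omega
  | succ n ih =>
    intro m hm _
    rcases Nat.eq_zero_or_pos n with hn | hn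
    · subst hn
      have hp1 : pyBin 1 = ['1'] := by unfold pyBin; norm_num [binCore_one]
      interval_cases m
      · rfl
      · rw [hp1]; rfl
    · by_cases hlow : m < 2^n
      · have hIH := ih m hlow hn
        have hlen : (pyBin m).length ≤ n := by
          have := congrArg List.length hIH
          simp [len_bitsChars] at this
          omega
        have : n + 1 - (pyBin m).length = (n - (pyBin m).length) + 1 := by omega
        rw [this, List.replicate_succ, List.cons_append, hIH, bitsChars_zero_cons n m hlow]
      · have hm0 : m ≠ 0 := by have := Nat.one_le_two_pow (n := n); omega
        obtain ⟨he, hl⟩ := binCore_eq n m (by omega) hm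
        simp only [pyBin, if_neg hm0, he]
        rw [len_bitsChars]
        simp

theorem emod_halve (v : Int) (n : Nat) : ((v % 2^(n+1)).toNat) / 2 = ((v/2) % 2^n).toNat := by
  have hP : (0:Int) < 2^n := by positivity
  have hv : 2 * (v / 2) + v % 2 = v := Int.ediv_add_emod v 2
  have hr0 : 0 ≤ v % 2 := Int.emod_nonneg v (by norm_num)
  have hr1 : v % 2 < 2 := Int.emod_lt_of_pos v (by norm_num)
  have hq : 2^n * (v / 2 / 2^n) + (v / 2) % 2^n = v / 2 := Int.ediv_add_emod (v/2) (2^n)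
  have ht0 : 0 ≤ (v / 2) % 2^n := Int.emod_nonneg _ (by omega)
  have ht1 : (v / 2) % 2^n < 2^n := Int.emod_lt_of_pos _ hP
  have hrepr : v % 2^(n+1) = 2 * ((v/2) % 2^n) + v % 2 := by
    have hd : v = (2 * ((v/2) % 2^n) + v % 2) + 2^(n+1) * (v / 2 / 2^n) := by
      linear_combination -hv - 2 * hq
    have hub : 2 * ((v/2) % 2^n) + v % 2 < 2^(n+1) := by
      have hpow : (2:Int)^(n+1) = 2^n * 2 := pow_succ 2 n
      omega
    calc v % 2^(n+1) = ((2 * ((v/2) % 2^n) + v % 2) + 2^(n+1) * (v / 2 / 2^n)) % 2^(n+1) := by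
            rw [← hd]
      _ = (2 * ((v/2) % 2^n) + v % 2) % 2^(n+1) := by rw [Int.add_mul_emod_self_left]
      _ = 2 * ((v/2) % 2^n) + v % 2 := Int.emod_eq_of_lt (by omega) hub
  rw [hrepr]; omega

theorem emod_lsb (v : Int) (n : Nat) : ((v % 2^(n+1)).toNat) % 2 = (v % 2).toNat := by
  have h : v % 2^(n+1) % 2 = v % 2 := Int.emod_emod_of_dvd v ⟨2^n, by rw [pow_succ]; ring⟩
  have h0 : 0 ≤ v % 2^(n+1) := Int.emod_nonneg v (by positivity)
  have hr0 : 0 ≤ v % 2 := Int.emod_nonneg v (by norm_num)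
  have hr1 : v % 2 < 2 := Int.emod_lt_of_pos v (by norm_num)
  omega

theorem bandMask (v : Int) (n : Nat) : PySem.Int.band v (2^n - 1) = v % 2^n := by
  have hc : ((2^n : Nat) : Int) = 2^n := by push_cast; ring
  have h1 : (1:Nat) ≤ 2^n := Nat.one_le_two_pow
  have hmask : ((2:Int)^n - 1).toNat = 2^n - 1 := by omega
  have hbpos : (0:Int) ≤ 2^n - 1 := by omega
  rcases (by omega : 0 ≤ v ∨ v < 0) with hv | hv
  · rw [PySem.Int.band_of_nonneg hv hbpos, hmask, Nat.and_two_pow_sub_one_eq_mod]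
    rw [Int.natCast_mod, hc, Int.toNat_of_nonneg hv]
  · have hnv : ¬ (0 ≤ v) := not_le.mpr hv
    simp only [PySem.Int.band, if_neg hnv, if_pos hbpos, hmask]
    set w := (-v - 1).toNat with hwdef
    have hwv : v = -(↑w + 1) := by omega
    rw [Nat.and_comm, Nat.and_two_pow_sub_one_eq_mod]
    have hwm : w % 2^n < 2^n := Nat.mod_lt w (by omega)
    have hwd : 2^n * (w / 2^n) + w % 2^n = w := Nat.div_add_mod w (2^n)
    have hwdI : (2^n : Int) * ↑(w / 2^n) + ↑(w % 2^n) = ↑w := by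
      exact_mod_cast hwd
    have hrepr : v % 2^n = (2^n : Int) - 1 - ↑(w % 2^n) := by
      have hd : v = ((2^n : Int) - 1 - ↑(w % 2^n)) + 2^n * (-(↑(w / 2^n)) - 1) := by
        rw [hwv]; linear_combination hwdI
      calc v % 2^n = (((2^n : Int) - 1 - ↑(w % 2^n)) + 2^n * (-(↑(w / 2^n)) - 1)) % 2^n := by
            rw [← hd]
        _ = ((2^n : Int) - 1 - ↑(w % 2^n)) % 2^n := by rw [Int.add_mul_emod_self_left]
        _ = (2^n : Int) - 1 - ↑(w % 2^n) := Int.emod_eq_of_lt (by omega) (by omega)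
    rw [hrepr]; omega

theorem foldl_snoc {α β : Type} (h : α → β) : ∀ (l : List α) (acc : List β),
    l.foldl (fun r a => r ++ [h a]) acc = acc ++ l.map h := by
  intro l
  induction l with
  | nil => intro acc; simp
  | cons x xs ih => intro acc; simp [ih]

theorem main_bits (n : Nat) : ∀ v : Int,
    ((List.range n).map (fun k => if PySem.Int.band (HShiftRight.hShiftRight (β := Nat) v k) 1 ≠ 0 then "vcc" else "gnd")).reverse
      = (bitsChars n ((v % 2^n).toNat)).map chr2sig := by
  induction n with
  | zero => intro v; rfl
  | succ n ih =>
    intro v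
    rw [List.range_succ_eq_map]
    simp only [List.map_cons, List.map_map, List.reverse_cons]
    have hmapeq : (List.range n).map ((fun k => if PySem.Int.band (HShiftRight.hShiftRight (β := Nat) v k) 1 ≠ 0 then "vcc" else "gnd") ∘ Nat.succ)
        = (List.range n).map (fun k => if PySem.Int.band (HShiftRight.hShiftRight (β := Nat) (v/2) k) 1 ≠ 0 then "vcc" else "gnd") := by
      apply List.map_congr_left
      intro k _
      have hstep : HShiftRight.hShiftRight (β := Nat) v (Nat.succ k) = HShiftRight.hShiftRight (β := Nat) (v/2) k := by
        show v >>> (k+1) = (v/2) >>> k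
        rw [Int.shiftRight_eq_div_pow, Int.shiftRight_eq_div_pow,
            Int.ediv_ediv_of_nonneg (by norm_num)]
        norm_num [pow_succ, mul_comm]
      simp only [Function.comp_apply, hstep]
    show ((List.range n).map _).reverse ++ [_] = _
    rw [hmapeq, ih (v/2)]
    show _ = (bitsChars n _ ++ [_]).map chr2sig
    rw [List.map_append]
    congr 1
    · rw [emod_halve v n]
    · -- the LSB element
      have hsr0 : HShiftRight.hShiftRight (β := Nat) v 0 = v := by
        show v >>> (0:Nat) = v
        rw [Int.shiftRight_eq_div_pow]; norm_num
      have hband : PySem.Int.band v 1 = v % 2 := by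
        rw [PySem.Int.band_one, PySem.Int.mod_eq_emod_of_pos (by norm_num)]
      have hr0 : 0 ≤ v % 2 := Int.emod_nonneg v (by norm_num)
      have hr1 : v % 2 < 2 := Int.emod_lt_of_pos v (by norm_num)
      have hlsb := emod_lsb v n
      simp only [hsr0, hband, List.map_cons, List.map_nil]
      by_cases h0 : v % 2 = 0
      · have : (v % 2^(n+1)).toNat % 2 = 0 := by omega
        simp [h0, this, chr2sig]
      · have h1' : v % 2 = 1 := by omega
        have : (v % 2^(n+1)).toNat % 2 = 1 := by omega
        simp [h0, this, chr2sig]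

-- ===== VERDICT (by name: the statement is the Claim_ definition above) =====
theorem int2bus_spec : Claim_equal_int2bus := by
  intro Wid Int_ _
  unfold Spec_int2bus int2bus int2bus_alt
  rcases (by omega : Wid ≤ 0 ∨ 0 < Wid) with hw | hw
  · rw [PySem.List.pyRange_one_eq_nil hw, if_pos hw]
    rfl
  · rw [if_neg (not_le.mpr hw)]
    set n := Wid.toNat with hn
    have hn1 : 1 ≤ n := by omega
    have hc : ((2^n : Nat) : Int) = 2^n := by push_cast; ring
    have hshl : ((1 <<< n : Nat) : Int) - 1 = 2^n - 1 := by
      push_cast [Nat.shiftLeft_eq]; ring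
    have hmasked : (PySem.Int.band Int_ (((1 <<< n : Nat) : Int) - 1)).toNat = (Int_ % 2^n).toNat := by
      rw [hshl, bandMask]
    have hmlt : (Int_ % 2^n).toNat < 2^n := by
      have h0 : 0 ≤ Int_ % 2^n := Int.emod_nonneg Int_ (by positivity)
      have h1 : Int_ % 2^n < 2^n := Int.emod_lt_of_pos Int_ (by positivity)
      omega
    rw [PySem.List.pyRange_one]
    simp only [List.foldl_map, sub_zero, ← hn]
    rw [foldl_snoc]
    simp only [zero_add, Int.toNat_natCast, List.nil_append]
    rw [main_bits n Int_, hmasked, pyBin_pad n _ hmlt hn1]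
    rfl
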